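-- pv_equiv track=rewrite | github.com/anhmt90/master-interdisciplinary-project | analysis/company_matcher.py | remove_extra_grams
-- ===== SOURCE A (Python) =====
-- EXTRA_GRAMS = {'open': 'source'}
--
-- def remove_extra_grams(tokens):
--     removed = set()
--     for i in range(len(tokens)):
--         if EXTRA_GRAMS.get(tokens[i]) and i + 1 < len(tokens):
--             if EXTRA_GRAMS.get(tokens[i]) == tokens[i + 1]:
--                 removed.update([i, i + 1])
--
--     for i in sorted(list(removed), reverse=True):
--         del tokens[i]
--
--     return tokens
-- ===== SOURCE B (Python) =====
-- EXTRA_GRAMS = {'open': 'source'}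
--
-- def remove_extra_grams(tokens):
--     result = []
--     i = 0
--     n = len(tokens)
--     while i < n:
--         v = EXTRA_GRAMS.get(tokens[i])
--         if v and i + 1 < n and tokens[i + 1] == v:
--             i += 2
--         else:
--             result.append(tokens[i])
--             i += 1
--     tokens[:] = result
--     return tokens
-- ===== Notes on version B (the rewrite author's own statement) =====
-- stated objective: simpler
-- what changed: Replaces A's two-phase algorithm (collect a set of marked indices, sort it descending, delete each index in place) with a single greedy forward pass that skips a matched pair (i += 2) or copies the token (i += 1), then writes the result back in place; correct because a pair's second token 'source' is never a pair-starting key, so matched pairs cannot overlap.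
import Mathlib
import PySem

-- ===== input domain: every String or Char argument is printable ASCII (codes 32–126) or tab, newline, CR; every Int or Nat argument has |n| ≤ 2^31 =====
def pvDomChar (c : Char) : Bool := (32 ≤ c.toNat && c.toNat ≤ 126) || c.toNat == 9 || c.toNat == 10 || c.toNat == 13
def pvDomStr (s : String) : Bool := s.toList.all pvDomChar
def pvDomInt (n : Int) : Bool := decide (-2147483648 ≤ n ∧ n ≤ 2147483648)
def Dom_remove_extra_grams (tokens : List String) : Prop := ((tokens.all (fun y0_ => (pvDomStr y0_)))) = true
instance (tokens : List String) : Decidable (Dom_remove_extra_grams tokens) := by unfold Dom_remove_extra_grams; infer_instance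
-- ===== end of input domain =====

-- B replaces A's two-phase mark-then-delete (index set, sorted descending, del) with one greedy
-- forward pass that skips a matched pair or copies a token (objective: simpler).
-- A and B both mutate the caller's list in place in Python; the equivalence proved here is about the return value.

-- ===== PORT A =====
def EXTRA_GRAMS : PySem.Dict String String := PySem.Dict.mk [("open", "source")]

-- removed = the set built by A's first loop ('EXTRA_GRAMS.get(tokens[i])' is truthy iff the
-- looked-up value, defaulted to "", is a nonempty string).
def pvRemoved (tokens : List String) : PySem.Set Int :=
  (PySem.List.pyRange 0 (PySem.List.len tokens) 1).foldl
    (fun s i =>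
      if ((EXTRA_GRAMS.get? (PySem.List.pyGetD tokens i "")).getD "" ≠ "") ∧
          i + 1 < PySem.List.len tokens then
        if EXTRA_GRAMS.get? (PySem.List.pyGetD tokens i "") =
            some (PySem.List.pyGetD tokens (i + 1) "") then
          PySem.Set.update s [i, i + 1]
        else s
      else s)
    PySem.Set.empty

def remove_extra_grams (tokens : List String) : List String :=
  -- second loop: 'for i in sorted(list(removed), reverse=True): del tokens[i]'
  -- (every index in removed is in range, so pop? never returns none; the none branch is for totality only)
  (PySem.List.sorted (pvRemoved tokens) (fun x => x) true).foldl
    (fun l i => match PySem.List.pop? l i with | some r => r.2 | none => l) tokens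

-- ===== PORT B =====
-- B's while-loop over index i, as structural recursion on the remaining suffix.
def pvAltGo : List String → List String
  | [] => []
  | t :: rest =>
    match EXTRA_GRAMS.get? t with
    | some v =>
      if v ≠ "" then
        match rest with
        | u :: rest' => if u = v then pvAltGo rest' else t :: pvAltGo (u :: rest')
        | [] => [t]
      else t :: pvAltGo rest
    | none => t :: pvAltGo rest

def remove_extra_grams_alt (tokens : List String) : List String := pvAltGo tokens

-- ===== PRECONDITION & SPEC =====
def Spec_remove_extra_grams (tokens : List String) (out : List String) : Prop := out = remove_extra_grams_alt tokens
instance (tokens : List String) (out : List String) : Decidable (Spec_remove_extra_grams tokens out) := by unfold Spec_remove_extra_grams; infer_instance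

-- ===== CLAIM (what is proved, stated in full; the proofs are below) =====
def Claim_equal_remove_extra_grams : Prop := ∀ (tokens : List String), Dom_remove_extra_grams tokens → Spec_remove_extra_grams tokens (remove_extra_grams tokens)

-- ===== LEMMAS AND PROOFS =====

-- pairB ts n: A marks the pair {n, n+1}, i.e. ts[n] = "open" and ts[n+1] = "source"
def pairB (ts : List String) (n : Nat) : Bool :=
  (ts.getD n "" == "open") && (ts.getD (n + 1) "" == "source")

-- badB ts n: index n belongs to A's removed set
def badB (ts : List String) (n : Nat) : Bool :=
  pairB ts n || (decide (n ≠ 0) && pairB ts (n - 1))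

-- keep the elements whose index falsifies p
def keepF : List String → (Nat → Bool) → List String
  | [], _ => []
  | x :: r, p => if p 0 then keepF r (fun n => p (n + 1)) else x :: keepF r (fun n => p (n + 1))

theorem keepF_cons (x : String) (r : List String) (p : Nat → Bool) :
    keepF (x :: r) p = if p 0 then keepF r (fun n => p (n + 1))
      else x :: keepF r (fun n => p (n + 1)) := rfl

theorem keepF_congr (ts : List String) (p q : Nat → Bool) (h : ∀ n, p n = q n) :
    keepF ts p = keepF ts q := congrArg (keepF ts) (funext h)

theorem keepF_false (ts : List String) (p : Nat → Bool) (h : ∀ n, p n = false) :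
    keepF ts p = ts := by
  induction ts generalizing p with
  | nil => rfl
  | cons x r ih =>
    simp only [keepF, h 0, Bool.false_eq_true, if_false]
    rw [ih _ (fun n => h (n + 1))]

theorem keepF_erase (ts : List String) : ∀ (d : Nat) (p : Nat → Bool),
    (∀ j, p j = true → j < d) → d < ts.length →
    keepF (ts.eraseIdx d) p = keepF ts (fun i => p i || decide (i = d)) := by
  induction ts with
  | nil => intro d p _ h; simp at h
  | cons x r ih =>
    intro d p hp hd
    cases d with
    | zero =>
      have hp0 : ∀ j, p j = false := fun j => by
        cases h : p j with
        | false => rfl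
        | true => exact absurd (hp j h) (by omega)
      rw [List.eraseIdx_cons_zero, keepF_false r p hp0]
      simp only [keepF]
      rw [if_pos (by simp [hp0])]
      exact (keepF_false _ _ (fun n => by simp [hp0])).symm
    | succ d =>
      simp only [List.eraseIdx_cons_succ, keepF]
      have h0 : (p 0 || decide (0 = d + 1)) = p 0 := by simp
      rw [h0, ih d (fun n => p (n + 1)) (fun j hj => by have := hp (j + 1) hj; omega)
            (Nat.lt_of_succ_lt_succ hd)]
      rw [keepF_congr r (fun i => p (i + 1) || decide (i = d))
            (fun n => p (n + 1) || decide (n + 1 = d + 1)) (fun n => by simp)]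

-- A's deletion loop on a strictly descending list of in-range nonnegative indices
theorem foldl_pop_desc : ∀ (order : List Int) (ts : List String),
    order.Pairwise (· > ·) → (∀ x ∈ order, 0 ≤ x ∧ x.toNat < ts.length) →
    order.foldl (fun l i => match PySem.List.pop? l i with | some r => r.2 | none => l) ts =
      keepF ts (fun n => decide ((n : Int) ∈ order)) := by
  intro order
  induction order with
  | nil =>
    intro ts _ _
    rw [List.foldl_nil, keepF_false ts _ (fun n => by simp)]
  | cons d rest ih =>
    intro ts hpw hin
    obtain ⟨hd0, hdlen⟩ := hin d (by simp)
    have hdc : d = ((d.toNat : Nat) : Int) := (Int.toNat_of_nonneg hd0).symm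
    simp only [List.foldl_cons]
    rw [hdc, PySem.List.pop?_natCast ts d.toNat hdlen]
    have hrest : ∀ x ∈ rest, 0 ≤ x ∧ x.toNat < (ts.eraseIdx d.toNat).length := by
      intro x hx
      obtain ⟨hx0, _⟩ := hin x (by simp [hx])
      have hxd : x < d := (List.pairwise_cons.mp hpw).1 x hx
      refine ⟨hx0, ?_⟩
      rw [List.length_eraseIdx_of_lt hdlen]
      omega
    rw [ih (ts.eraseIdx d.toNat) (List.pairwise_cons.mp hpw).2 hrest]
    rw [keepF_erase ts d.toNat (fun n => decide ((n : Int) ∈ rest))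
          (fun j hj => by
            have hjr : (j : Int) ∈ rest := by simpa using hj
            have := (List.pairwise_cons.mp hpw).1 _ hjr
            omega)
          hdlen]
    refine keepF_congr _ _ _ (fun n => ?_)
    simp only [List.mem_cons]
    have hde : decide (n = d.toNat) = decide ((n : Int) = ((d.toNat : Nat) : Int)) :=
      decide_eq_decide.mpr (by omega)
    rw [hde, Bool.or_comm, Bool.decide_or]

-- marked pairs are in range
theorem pairB_lt {ts : List String} {n : Nat} (h : pairB ts n = true) : n < ts.length := by
  by_contra hn
  simp only [pairB, Bool.and_eq_true, beq_iff_eq] at h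
  rw [List.getD_eq_default _ _ (by omega : ts.length ≤ n)] at h
  exact absurd h.1 (by decide)

theorem pairB_succ_lt {ts : List String} {n : Nat} (h : pairB ts n = true) :
    n + 1 < ts.length := by
  by_contra hn
  simp only [pairB, Bool.and_eq_true, beq_iff_eq] at h
  rw [List.getD_eq_default _ _ (by omega : ts.length ≤ n + 1)] at h
  exact absurd h.2 (by decide)

theorem badB_lt {ts : List String} {n : Nat} (h : badB ts n = true) : n < ts.length := by
  simp only [badB, Bool.or_eq_true, Bool.and_eq_true, decide_eq_true_eq] at h
  rcases h with h | ⟨hn, h⟩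
  · exact pairB_lt h
  · have := pairB_succ_lt h
    omega

-- EXTRA_GRAMS.get as a closed form
theorem EXTRA_GRAMS_get (s : String) :
    EXTRA_GRAMS.get? s = if s = "open" then some "source" else none := by
  rw [EXTRA_GRAMS, PySem.Dict.get?_mk_cons]
  by_cases h : s = "open"
  · simp [h]
  · have h2 : ("open" == s) = false := beq_eq_false_iff_ne.mpr (Ne.symm h)
    rw [if_neg (by simp [h2]), if_neg h]
    rfl

-- A's mark-step function, rewritten through pairB (valid at nonnegative indices)
theorem step_eq_pairB (ts : List String) (i : Int) (h0 : 0 ≤ i) (s : PySem.Set Int) :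
    (if ((EXTRA_GRAMS.get? (PySem.List.pyGetD ts i "")).getD "" ≠ "") ∧
        i + 1 < PySem.List.len ts then
      if EXTRA_GRAMS.get? (PySem.List.pyGetD ts i "") =
          some (PySem.List.pyGetD ts (i + 1) "") then
        PySem.Set.update s [i, i + 1]
      else s
     else s) = if pairB ts i.toNat then PySem.Set.update s [i, i + 1] else s := by
  obtain ⟨m, rfl⟩ : ∃ m : Nat, i = (m : Int) := ⟨i.toNat, (Int.toNat_of_nonneg h0).symm⟩
  have h1 : ((m : Int) + 1) = ((m + 1 : Nat) : Int) := by push_cast; ring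
  rw [h1]
  simp only [PySem.List.pyGetD_natCast, EXTRA_GRAMS_get, PySem.List.len_eq, Int.toNat_natCast,
    pairB]
  by_cases ho : ts.getD m "" = "open"
  · have hg : (if ts.getD m "" = "open" then some "source" else (none : Option String)) =
        some "source" := if_pos ho
    have hb : (ts.getD m "" == "open") = true := beq_iff_eq.mpr ho
    rw [hg]
    simp only [hb, Bool.true_and, Option.getD_some]
    by_cases hs : ts.getD (m + 1) "" = "source"
    · have hlt : m + 1 < ts.length := by
        by_contra hn
        rw [List.getD_eq_default _ _ (by omega : ts.length ≤ m + 1)] at hs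
        exact absurd hs (by decide)
      have hlt' : ((m + 1 : Nat) : Int) < (ts.length : Int) := by exact_mod_cast hlt
      have hrt : (ts.getD (m + 1) "" == "source") = true := beq_iff_eq.mpr hs
      rw [if_pos ⟨by decide, hlt'⟩, if_pos (by rw [hs]), if_pos hrt]
    · have hr : (ts.getD (m + 1) "" == "source") = false := beq_eq_false_iff_ne.mpr hs
      simp only [hr]
      conv_rhs => rw [if_neg (by simp : ¬ (false = true))]
      split_ifs with hA hB
      · exact absurd (Option.some.inj hB).symm hs
      · rfl
      · rfl
  · have hg : (if ts.getD m "" = "open" then some "source" else (none : Option String)) =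
        none := if_neg ho
    have hb : (ts.getD m "" == "open") = false := beq_eq_false_iff_ne.mpr (by exact ho)
    rw [hg]
    simp only [hb, Bool.false_and]
    rw [if_neg (by simp)]
    conv_rhs => rw [if_neg (by simp : ¬ (false = true))]

-- membership in the clean mark fold
theorem mem_mark_fold (ts : List String) (l : List Int) (s : PySem.Set Int) (x : Int) :
    x ∈ l.foldl (fun s i => if pairB ts i.toNat then PySem.Set.update s [i, i + 1] else s) s ↔
      x ∈ s ∨ ∃ i ∈ l, pairB ts i.toNat = true ∧ (x = i ∨ x = i + 1) := by
  induction l generalizing s with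
  | nil => simp
  | cons a l ih =>
    simp only [List.foldl_cons]
    by_cases ha : pairB ts a.toNat = true
    · rw [if_pos ha, ih]
      constructor
      · rintro (hm | ⟨i, hil, hpi, hx⟩)
        · rw [PySem.Set.mem_update] at hm
          rcases hm with hs | hx
          · exact Or.inl hs
          · exact Or.inr ⟨a, List.mem_cons_self, ha, by simpa using hx⟩
        · exact Or.inr ⟨i, List.mem_cons_of_mem a hil, hpi, hx⟩
      · rintro (hs | ⟨i, hil, hpi, hx⟩)
        · exact Or.inl (by rw [PySem.Set.mem_update]; exact Or.inl hs)
        · rcases List.mem_cons.mp hil with rfl | hil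
          · exact Or.inl (by rw [PySem.Set.mem_update]; exact Or.inr (by simpa using hx))
          · exact Or.inr ⟨i, hil, hpi, hx⟩
    · rw [if_neg ha, ih]
      constructor
      · rintro (hs | ⟨i, hil, hpi, hx⟩)
        · exact Or.inl hs
        · exact Or.inr ⟨i, List.mem_cons_of_mem a hil, hpi, hx⟩
      · rintro (hs | ⟨i, hil, hpi, hx⟩)
        · exact Or.inl hs
        · rcases List.mem_cons.mp hil with rfl | hil
          · exact absurd hpi ha
          · exact Or.inr ⟨i, hil, hpi, hx⟩

theorem pvRemoved_eq (ts : List String) :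
    pvRemoved ts = (PySem.List.pyRange 0 (PySem.List.len ts) 1).foldl
      (fun s i => if pairB ts i.toNat then PySem.Set.update s [i, i + 1] else s)
      PySem.Set.empty := by
  rw [pvRemoved]
  exact PySem.List.foldl_congr_mem
    (PySem.List.pyRange 0 (PySem.List.len ts) 1) _ _ PySem.Set.empty
    (fun s i hi => step_eq_pairB ts i (PySem.List.mem_pyRange_one.mp hi).1 s)

theorem mem_pvRemoved (ts : List String) (x : Int) :
    x ∈ pvRemoved ts ↔ (0 ≤ x ∧ badB ts x.toNat = true) := by
  rw [pvRemoved_eq, mem_mark_fold]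
  simp only [PySem.Set.empty, List.not_mem_nil, false_or, PySem.List.mem_pyRange_one,
    PySem.List.len_eq]
  constructor
  · rintro ⟨i, ⟨hi0, _⟩, hpi, rfl | rfl⟩
    · exact ⟨hi0, by simp [badB, hpi]⟩
    · refine ⟨by omega, ?_⟩
      have h1 : (i + 1).toNat = i.toNat + 1 := by omega
      simp [badB, h1, hpi]
  · rintro ⟨hx0, hb⟩
    simp only [badB, Bool.or_eq_true, Bool.and_eq_true, decide_eq_true_eq] at hb
    rcases hb with hp | ⟨hne, hp⟩
    · refine ⟨x, ⟨hx0, ?_⟩, hp, Or.inl rfl⟩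
      have := pairB_lt hp
      omega
    · have hxn : x.toNat ≠ 0 := hne
      have h1 : (x - 1).toNat = x.toNat - 1 := by omega
      refine ⟨x - 1, ⟨by omega, ?_⟩, by rw [h1]; exact hp, Or.inr (by ring)⟩
      have := pairB_lt (by rw [h1] at *; exact hp)
      omega

theorem nodup_mark_fold (ts : List String) (l : List Int) (s : PySem.Set Int)
    (hs : s.Nodup) :
    (l.foldl (fun s i => if pairB ts i.toNat then PySem.Set.update s [i, i + 1] else s)
      s).Nodup := by
  induction l generalizing s with
  | nil => exact hs
  | cons a l ih =>
    simp only [List.foldl_cons]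
    split_ifs with h
    · exact ih _ (PySem.Set.nodup_update _ _ hs)
    · exact ih _ hs

theorem nodup_pvRemoved (ts : List String) : (pvRemoved ts).Nodup := by
  rw [pvRemoved_eq]
  exact nodup_mark_fold ts _ _ List.nodup_nil

-- B's pass computes keepF with badB
theorem pairB_cons_succ (x : String) (r : List String) (n : Nat) :
    pairB (x :: r) (n + 1) = pairB r n := by
  simp [pairB]

theorem badB_cons (x : String) (r : List String) (hx : pairB (x :: r) 0 = false) (n : Nat) :
    badB (x :: r) (n + 1) = badB r n := by
  cases n with
  | zero => simp [badB, pairB_cons_succ, hx]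
  | succ n =>
    have h1 : n + 1 + 1 - 1 = n + 1 := by omega
    have h2 : n + 1 - 1 = n := by omega
    simp only [badB, pairB_cons_succ, h1, h2]
    simp

theorem badB_skip (r : List String) (n : Nat) :
    badB ("open" :: "source" :: r) (n + 2) = badB r n := by
  have e3 : ∀ k, pairB ("open" :: "source" :: r) (k + 2) = pairB r k := fun k => by
    rw [show k + 2 = (k + 1) + 1 from rfl, pairB_cons_succ, pairB_cons_succ]
  have e1 : pairB ("open" :: "source" :: r) 1 = false := by
    simp [pairB]
  cases n with
  | zero =>
    have h1 : 0 + 2 - 1 = 1 := by omega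
    simp only [badB, e3 0, h1, e1]
    simp
  | succ n =>
    have h1 : n + 1 + 2 - 1 = n + 2 := by omega
    simp only [badB, e3 (n + 1), h1, e3 n]
    have h2 : n + 1 - 1 = n := by omega
    simp [h2]

theorem altGo_eq (ts : List String) : pvAltGo ts = keepF ts (badB ts) := by
  induction ts using pvAltGo.induct with
  | case1 => rfl
  | case2 t u rest' hget hu ih =>
    rw [EXTRA_GRAMS_get] at hget
    by_cases ht : t = "open"
    · rw [if_pos ht] at hget
      subst ht
      injection hget with hu2
      subst hu2
      have hp0 : badB ("open" :: "source" :: rest') 0 = true := by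
        simp [badB, pairB]
      have hp1 : badB ("open" :: "source" :: rest') 1 = true := by
        simp [badB, pairB]
      show pvAltGo rest' = keepF ("open" :: "source" :: rest') _
      rw [ih, keepF_cons, if_pos hp0, keepF_cons, if_pos hp1]
      exact (keepF_congr _ _ _ (fun n => badB_skip rest' n)).symm
    · rw [if_neg ht] at hget
      exact absurd hget (by simp)
  | case3 t v hget hv u rest' hne ih =>
    rw [EXTRA_GRAMS_get] at hget
    by_cases ht : t = "open"
    · rw [if_pos ht] at hget
      subst ht
      injection hget with hv2
      have hne' : ¬ u = "source" := by rw [← hv2] at hne; exact hne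
      have hp0 : pairB ("open" :: u :: rest') 0 = false := by
        simp only [pairB, List.getD_cons_zero, List.getD_cons_succ]
        simp [hne']
      have hb0 : badB ("open" :: u :: rest') 0 = false := by
        simp [badB, hp0]
      show (if u = "source" then pvAltGo rest'
            else "open" :: pvAltGo (u :: rest')) = keepF ("open" :: u :: rest') _
      rw [if_neg hne', ih]
      conv_rhs => rw [keepF_cons]
      rw [if_neg (by simp [hb0])]
      exact congrArg _ (keepF_congr _ _ _ (fun n => (badB_cons _ _ hp0 n).symm))
    · rw [if_neg ht] at hget
      exact absurd hget (by simp)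
  | case4 t v hget hv =>
    have hp0 : badB [t] 0 = false := by simp [badB, pairB]
    have hL : pvAltGo [t] = [t] := by
      simp only [pvAltGo, hget, ite_self]
    rw [hL]
    simp [keepF, hp0]
  | case5 t rest v hget hv ih =>
    rw [EXTRA_GRAMS_get] at hget
    by_cases ht : t = "open"
    · rw [if_pos ht] at hget
      have hv0 : v = "" := not_ne_iff.mp hv
      rw [hv0] at hget
      exact absurd (Option.some.inj hget) (by decide)
    · rw [if_neg ht] at hget
      exact absurd hget (by simp)
  | case6 t rest hget ih =>
    have ht : ¬ t = "open" := by
      intro h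
      rw [EXTRA_GRAMS_get, if_pos h] at hget
      exact absurd hget (by simp)
    have hp0 : pairB (t :: rest) 0 = false := by
      simp [pairB, ht]
    have hb0 : badB (t :: rest) 0 = false := by simp [badB, hp0]
    have hL : pvAltGo (t :: rest) = t :: pvAltGo rest := by
      simp only [pvAltGo, hget]
    rw [hL, ih, keepF_cons, if_neg (by simp [hb0])]
    exact congrArg _ (keepF_congr _ _ _ (fun n => (badB_cons _ _ hp0 n).symm))

-- the sorted descending order list: strictly descending, members = removed set
theorem order_pairwise (ts : List String) :
    (PySem.List.sorted (pvRemoved ts) (fun x => x) true).Pairwise (· > ·) := by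
  have h1 := PySem.List.sorted_pairwise_rev (xs := pvRemoved ts) (key := fun x => x)
  have h2 : (PySem.List.sorted (pvRemoved ts) (fun x => x) true).Nodup :=
    (PySem.List.sorted_perm (pvRemoved ts) (fun x => x) true).nodup_iff.mpr
      (nodup_pvRemoved ts)
  have := h1.and (List.Pairwise.imp (fun h => h) h2)
  exact this.imp (fun {a b} h => by
    rcases h with ⟨hle, hne⟩
    omega)

theorem remove_extra_grams_spec : Claim_equal_remove_extra_grams := by
  unfold Claim_equal_remove_extra_grams
  intro tokens _
  unfold Spec_remove_extra_grams remove_extra_grams remove_extra_grams_alt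
  rw [altGo_eq]
  rw [foldl_pop_desc _ tokens (order_pairwise tokens) (by
    intro x hx
    have hm : x ∈ pvRemoved tokens := (PySem.List.mem_sorted _ _ _ _).mp hx
    obtain ⟨h0, hb⟩ := (mem_pvRemoved tokens x).mp hm
    exact ⟨h0, badB_lt hb⟩)]
  refine keepF_congr _ _ _ (fun n => ?_)
  have : ((n : Int) ∈ PySem.List.sorted (pvRemoved tokens) (fun x => x) true) ↔
      badB tokens n = true := by
    rw [PySem.List.mem_sorted, mem_pvRemoved]
    simp
  cases hb : badB tokens n with
  | false => simp [this, hb]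
  | true => simp [this, hb]
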